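-- pv_equiv track=rewrite | github.com/azmat-codez/all_pdf_parse_code | mawb_hawb_code/NormalPDFParser.py | find_description_2
-- ===== SOURCE A (Python) =====
-- def find_description_2(texts):
--
--     replace_values = ['AGREED', 'agreed', 'Total', 'ARRANGED', 'A G R E E D',
--     'Agreed','s  ', 'AS  ', 'Logistics Inc)', 'on and has', 'being', 'solidation has',
--     'ransited', 'nistan, Libya,', 'ARRAND', 'SHIKHARLOGISTICS.COM', 'arge', '67,14', 'Volume)']
--
--     for value in replace_values:
--         texts = texts.replace(value, '')
--     lst = [text.strip() for text in texts.split('\n') if text.strip()]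
--
--     keywords_to_exclude = ['INVOICE', 'HS CODE', 'MANIFEST', 'NO.', 'PALLETS', 'CONTAINING:', 'DUE:', 'AWB', 'CBM']
--     result = None
--     for text in lst:
--         if not any(keyword in text for keyword in keywords_to_exclude):
--             result = text
--             if not any(char.isdigit() for char in result) and len(result) > 5:
--                 break
--     return result if result else "No description found"
-- ===== SOURCE B (Python) =====
-- def find_description_2(texts):
--
--     replace_values = ['AGREED', 'agreed', 'Total', 'ARRANGED', 'A G R E E D',
--     'Agreed','s  ', 'AS  ', 'Logistics Inc)', 'on and has', 'being', 'solidation has',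
--     'ransited', 'nistan, Libya,', 'ARRAND', 'SHIKHARLOGISTICS.COM', 'arge', '67,14', 'Volume)']
--
--     for value in replace_values:
--         texts = texts.replace(value, '')
--
--     keywords_to_exclude = ['INVOICE', 'HS CODE', 'MANIFEST', 'NO.', 'PALLETS', 'CONTAINING:', 'DUE:', 'AWB', 'CBM']
--
--     # One backward pass, no break and no intermediate candidate list: a clean
--     # line (no digits, length > 5) always overwrites the accumulator, so the
--     # earliest clean line wins; a non-clean line only fills an empty
--     # accumulator, so with no clean line the last non-excluded line survives.
--     best = None
--     for line in reversed(texts.split('\n')):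
--         t = line.strip()
--         if not t or any(k in t for k in keywords_to_exclude):
--             continue
--         if not any(ch.isdigit() for ch in t) and len(t) > 5:
--             best = t
--         elif best is None:
--             best = t
--     return best if best is not None else "No description found"
-- ===== Notes on version B (the rewrite author's own statement) =====
-- stated objective: alternative
-- what changed: Replaces A's forward scan with mutable result and mid-loop break by a single backward pass over the lines with one overwrite-accumulator: a clean line always overwrites (so the earliest clean line wins) and a non-clean line only fills an empty accumulator (so the last non-excluded line is the fallback); no break and no stored candidate list.
import Mathlib
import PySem

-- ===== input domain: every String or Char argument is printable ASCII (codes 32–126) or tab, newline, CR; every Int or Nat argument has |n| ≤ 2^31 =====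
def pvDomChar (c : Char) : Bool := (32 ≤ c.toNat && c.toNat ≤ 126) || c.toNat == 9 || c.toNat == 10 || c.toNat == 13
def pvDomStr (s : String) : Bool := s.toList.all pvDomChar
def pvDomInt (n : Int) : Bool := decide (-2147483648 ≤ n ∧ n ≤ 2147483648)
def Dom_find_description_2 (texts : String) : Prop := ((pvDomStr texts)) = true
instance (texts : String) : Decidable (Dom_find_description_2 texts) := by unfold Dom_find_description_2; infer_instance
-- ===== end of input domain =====

-- B replaces A's forward early-break scan by a single backward pass with an
-- overwrite accumulator (objective: alternative, same cost).

-- shared literal constants of both Pythons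
def pvReplaceValues : List String := ["AGREED", "agreed", "Total", "ARRANGED", "A G R E E D",
  "Agreed", "s  ", "AS  ", "Logistics Inc)", "on and has", "being", "solidation has",
  "ransited", "nistan, Libya,", "ARRAND", "SHIKHARLOGISTICS.COM", "arge", "67,14", "Volume)"]

def pvExclude : List String := ["INVOICE", "HS CODE", "MANIFEST", "NO.", "PALLETS",
  "CONTAINING:", "DUE:", "AWB", "CBM"]

-- not any(keyword in text for keyword in keywords_to_exclude)
def pvKeep (t : String) : Bool := !(pvExclude.any (fun k => PySem.Str.isIn k t))
-- not any(char.isdigit() for char in t) and len(t) > 5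
def pvClean (t : String) : Bool := !(t.toList.any PySem.Str.isdigit) && decide (5 < PySem.Str.len t)

-- ===== PORT A =====
-- A's for-loop with mutable `result` and `break`: structural recursion, state = result
def pvLoopA : List String → Option String → Option String
  | [], r => r
  | t :: ts, r =>
    if pvKeep t then
      if pvClean t then some t else pvLoopA ts (some t)
    else pvLoopA ts r

-- return result if result else "No description found"
def pvFinishA (r : Option String) : String :=
  match r with
  | none => "No description found"
  | some r => if r == "" then "No description found" else r

def find_description_2 (texts : String) : String :=
  let texts := pvReplaceValues.foldl (fun s v => PySem.Str.replace s v "") texts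
  let lst := (((PySem.Str.split? texts "\n").getD []).filter
      (fun line => PySem.Str.strip line != "")).map PySem.Str.strip
  pvFinishA (pvLoopA lst none)

-- ===== PORT B =====
-- body of B's backward loop: strip, skip empty/excluded lines, a clean line
-- overwrites the accumulator, a non-clean line only fills an empty accumulator
def pvStepB (best : Option String) (line : String) : Option String :=
  let t := PySem.Str.strip line
  if t == "" then best
  else if !(pvKeep t) then best
  else if pvClean t then some t
  else
    match best with
    | none => some t
    | some b => some b

def find_description_2_alt (texts : String) : String :=
  let texts := pvReplaceValues.foldl (fun s v => PySem.Str.replace s v "") texts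
  let best := (((PySem.Str.split? texts "\n").getD []).reverse).foldl pvStepB none
  match best with
  | none => "No description found"
  | some t => t

-- ===== PRECONDITION & SPEC =====
def Spec_find_description_2 (texts : String) (out : String) : Prop := out = find_description_2_alt texts
instance (texts : String) (out : String) : Decidable (Spec_find_description_2 texts out) := by unfold Spec_find_description_2; infer_instance

-- ===== CLAIM (what is proved, stated in full; the proofs are below) =====
def Claim_equal_find_description_2 : Prop := ∀ (texts : String), Dom_find_description_2 texts → Spec_find_description_2 texts (find_description_2 texts)

-- ===== LEMMAS AND PROOFS =====

-- the stripped non-empty non-excluded lines, the common reference point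
def pvCands (L : List String) : List String :=
  (L.map PySem.Str.strip).filter (fun t => t != "" && pvKeep t)

-- A's loop, characterised: first clean kept element, else last kept element, else the state
theorem pvLoopA_eq (lst : List String) (r : Option String) :
    pvLoopA lst r =
      match (lst.filter pvKeep).find? pvClean with
      | some t => some t
      | none =>
        match (lst.filter pvKeep).getLast? with
        | some t => some t
        | none => r := by
  induction lst generalizing r with
  | nil => simp [pvLoopA]
  | cons t ts ih =>
    by_cases hk : pvKeep t
    · by_cases hc : pvClean t
      · simp [pvLoopA, hk, hc]
      · simp only [pvLoopA, hk, if_true, if_false, ih, List.filter_cons,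
          List.find?, hc, Bool.false_eq_true]
        cases hfind : (ts.filter pvKeep).find? pvClean with
        | some u => simp
        | none =>
          cases hlast : (ts.filter pvKeep).getLast? with
          | some u =>
            cases hflt : ts.filter pvKeep with
            | nil => simp [hflt] at hlast
            | cons a l => simp_all [List.getLast?_cons]
          | none =>
            cases hflt : ts.filter pvKeep with
            | nil => simp
            | cons a l => simp [hflt] at hlast
    · simp [pvLoopA, hk, ih]

theorem filter_map_strip (l : List String) :
    ((l.filter (fun line => PySem.Str.strip line != "")).map PySem.Str.strip).filter pvKeep
      = pvCands l := by
  unfold pvCands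
  induction l with
  | nil => rfl
  | cons a l ih =>
    by_cases h : PySem.Str.strip a != "" <;>
      by_cases hk : pvKeep (PySem.Str.strip a) <;>
      simp [h, hk, ih]

-- B's backward foldl, characterised the same way
theorem pvFoldB_eq (L : List String) :
    (L.reverse).foldl pvStepB none =
      match (pvCands L).find? pvClean with
      | some t => some t
      | none => (pvCands L).getLast? := by
  rw [List.foldl_reverse]
  induction L with
  | nil => rfl
  | cons a l ih =>
    rw [List.foldr_cons, ih]
    simp only [pvCands, List.map_cons, List.filter_cons]
    by_cases h0 : PySem.Str.strip a = ""
    · simp [pvStepB, h0]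
    · have h0' : (PySem.Str.strip a != "") = true := by simp [h0]
      by_cases hk : pvKeep (PySem.Str.strip a)
      · by_cases hc : pvClean (PySem.Str.strip a)
        · simp [pvStepB, h0, h0', hk, hc]
        · simp only [pvStepB, h0', hk, hc, Bool.and_self, if_true, if_false,
            List.find?, Bool.false_eq_true, Bool.not_true]
          cases hfind : ((l.map PySem.Str.strip).filter (fun t => t != "" && pvKeep t)).find? pvClean with
          | some u => simp [h0]
          | none =>
            cases hflt : (l.map PySem.Str.strip).filter (fun t => t != "" && pvKeep t) with
            | nil => simp [h0]
            | cons b bs => simp [h0, List.getLast?_cons]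
      · simp [pvStepB, h0, h0', hk]

theorem pvCands_ne_nil_mem (L : List String) (t : String) (h : t ∈ pvCands L) : t ≠ "" := by
  unfold pvCands at h
  have := List.of_mem_filter h
  simp at this
  exact this.1

theorem find_description_2_spec : Claim_equal_find_description_2 := by
  intro texts _
  show find_description_2 texts = find_description_2_alt texts
  unfold find_description_2 find_description_2_alt
  dsimp only
  rw [pvLoopA_eq, filter_map_strip, pvFoldB_eq]
  set L := (PySem.Str.split? (pvReplaceValues.foldl (fun s v => PySem.Str.replace s v "") texts) "\n").getD [] with hL
  cases hfind : (pvCands L).find? pvClean with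
  | some u =>
    have hu : u ∈ pvCands L := List.mem_of_find?_eq_some hfind
    simp [pvFinishA, pvCands_ne_nil_mem L u hu]
  | none =>
    cases hlast : (pvCands L).getLast? with
    | some u =>
      have hu : u ∈ pvCands L := List.mem_of_getLast? hlast
      simp [pvFinishA, pvCands_ne_nil_mem L u hu]
    | none => simp [pvFinishA]
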